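-- pv_equiv track=rewrite | github.com/akcube/cso-ta-files | A2/script.py | grade_phase4
-- ===== SOURCE A (Python) =====
-- def grade_phase4(answer):
--     numbers = answer.strip().split()
--     try:
--         n = int(numbers[0])
--         sequence = list(map(int, numbers[1:]))
--         if n != len(sequence) or n < 5 or n > 9000:
--             return 0
--         for i in range(n):
--             if i % 2 == 0 and sequence[i] % 2 != 0:
--                 return 0
--             elif i % 2 == 1 and sequence[i] % 2 != 1:
--                 return 0
--         return 5
--     except ValueError:
--         return 0
-- ===== SOURCE B (Python) =====
-- def grade_phase4(answer):
--     tokens = answer.strip().split()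
--     try:
--         n = int(tokens[0])
--         sequence = [int(t) for t in tokens[1:]]
--         if n == len(sequence) and 5 <= n <= 9000:
--             if sequence[0] % 2 != 0:
--                 return 0
--             for a, b in zip(sequence, sequence[1:]):
--                 if a % 2 == b % 2:
--                     return 0
--             return 5
--         return 0
--     except ValueError:
--         return 0
-- ===== Notes on version B (the rewrite author's own statement) =====
-- stated objective: alternative
-- what changed: Replaces the index-parity loop (comparing each element's parity to its index's parity over range(n)) with an anchor-and-transition check: sequence[0] must be even and every adjacent pair must have different parities, scanned over zipped neighbour pairs with no index arithmetic.
import Mathlib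
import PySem

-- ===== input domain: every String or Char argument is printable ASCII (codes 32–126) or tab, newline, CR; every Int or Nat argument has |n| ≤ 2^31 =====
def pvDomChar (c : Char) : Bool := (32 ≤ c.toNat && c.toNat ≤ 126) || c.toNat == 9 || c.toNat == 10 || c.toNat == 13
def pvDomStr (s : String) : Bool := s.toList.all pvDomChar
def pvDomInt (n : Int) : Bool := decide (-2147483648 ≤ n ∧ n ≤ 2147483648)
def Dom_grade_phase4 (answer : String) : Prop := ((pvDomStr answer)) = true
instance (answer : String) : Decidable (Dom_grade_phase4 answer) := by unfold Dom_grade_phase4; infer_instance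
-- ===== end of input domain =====

-- B replaces A's index-parity loop with an anchor-and-transition check over adjacent pairs (alternative decomposition, same cost).

-- ===== PORT A =====
-- for i in range(n): if i%2==0 and seq[i]%2!=0: return 0 elif i%2==1 and seq[i]%2!=1: return 0; then return 5
def pvLoopA (seq : List Int) : List Int → Int
  | [] => 5
  | i :: is =>
    if PySem.Int.mod i 2 = 0 ∧ PySem.Int.mod (PySem.List.pyGetD seq i 0) 2 ≠ 0 then 0
    else if PySem.Int.mod i 2 = 1 ∧ PySem.Int.mod (PySem.List.pyGetD seq i 0) 2 ≠ 1 then 0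
    else pvLoopA seq is

def grade_phase4 (answer : String) : Int :=
  let numbers := PySem.Str.split₀ (PySem.Str.strip answer)
  match PySem.List.pyGet? numbers 0 with
  | none => 0  -- IndexError (uncaught in Python): excluded by Pre_
  | some first =>
    match PySem.Int.ofStr? first with
    | none => 0  -- except ValueError
    | some n =>
      match (PySem.List.slice numbers (some 1) none).mapM PySem.Int.ofStr? with
      | none => 0  -- except ValueError
      | some sequence =>
        if n ≠ (sequence.length : Int) ∨ n < 5 ∨ n > 9000 then 0
        else pvLoopA sequence (PySem.List.pyRange 0 n 1)

-- ===== PORT B =====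
-- for a, b in zip(sequence, sequence[1:]): if a%2 == b%2: return 0; then return 5
def pvFlipB : List Int → Int
  | a :: b :: rest =>
    if PySem.Int.mod a 2 = PySem.Int.mod b 2 then 0 else pvFlipB (b :: rest)
  | _ => 5

def grade_phase4_alt (answer : String) : Int :=
  let tokens := PySem.Str.split₀ (PySem.Str.strip answer)
  match PySem.List.pyGet? tokens 0 with
  | none => 0  -- IndexError (uncaught in Python): excluded by Pre_
  | some t0 =>
    match PySem.Int.ofStr? t0 with
    | none => 0  -- except ValueError
    | some n =>
      match (PySem.List.slice tokens (some 1) none).mapM PySem.Int.ofStr? with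
      | none => 0  -- except ValueError
      | some sequence =>
        if n = (sequence.length : Int) ∧ 5 ≤ n ∧ n ≤ 9000 then
          match sequence with
          | [] => 0  -- unreachable: the guard forces 5 ≤ n = len(sequence)
          | s0 :: _ =>
            if PySem.Int.mod s0 2 ≠ 0 then 0 else pvFlipB sequence
        else 0

-- ===== PRECONDITION & SPEC =====
-- Pre_ excludes inputs whose stripped text has no whitespace-separated tokens: there numbers[0] raises an uncaught IndexError (in A and likewise in B).
def Pre_grade_phase4 (answer : String) : Prop :=
  PySem.Str.split₀ (PySem.Str.strip answer) ≠ []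
instance (answer : String) : Decidable (Pre_grade_phase4 answer) := by unfold Pre_grade_phase4; infer_instance
def pvWitness_grade_phase4 : String := "5 0 1 2 3 4"

def Spec_grade_phase4 (answer : String) (out : Int) : Prop := out = grade_phase4_alt answer
instance (answer : String) (out : Int) : Decidable (Spec_grade_phase4 answer out) := by unfold Spec_grade_phase4; infer_instance

-- ===== CLAIM (what is proved, stated in full; the proofs are below) =====
def Claim_equal_grade_phase4 : Prop := ∀ (answer : String), Dom_grade_phase4 answer → Pre_grade_phase4 answer → Spec_grade_phase4 answer (grade_phase4 answer)

-- ===== LEMMAS AND PROOFS =====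

theorem pvMod2 {a : Int} : PySem.Int.mod a 2 = a % 2 :=
  PySem.Int.mod_eq_emod_of_pos (by norm_num)

-- A's loop over an index list: returns 5 iff every listed position's parity matches its index's parity.
theorem pvLoopA_eq (seq : List Int) (is : List Nat) :
    pvLoopA seq (is.map (fun k : Nat => (k : Int))) =
      if ∀ i ∈ is, (seq.getD i 0) % 2 = ((i : Int)) % 2 then 5 else 0 := by
  induction is with
  | nil => simp [pvLoopA]
  | cons i is ih =>
    simp only [List.map_cons, pvLoopA, pvMod2, PySem.List.pyGetD_natCast]
    have pi0 : 0 ≤ ((i : Int)) % 2 := Int.emod_nonneg _ (by norm_num)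
    have pi1 : ((i : Int)) % 2 < 2 := Int.emod_lt_of_pos _ (by norm_num)
    have ps0 : 0 ≤ (seq.getD i 0) % 2 := Int.emod_nonneg _ (by norm_num)
    have ps1 : (seq.getD i 0) % 2 < 2 := Int.emod_lt_of_pos _ (by norm_num)
    by_cases h : (seq.getD i 0) % 2 = ((i : Int)) % 2
    · have h0 : ¬ (((i:Int)) % 2 = 0 ∧ (seq.getD i 0) % 2 ≠ 0) := by omega
      have h1 : ¬ (((i:Int)) % 2 = 1 ∧ (seq.getD i 0) % 2 ≠ 1) := by omega
      rw [if_neg h0, if_neg h1, ih]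
      by_cases hall : ∀ j ∈ is, (seq.getD j 0) % 2 = ((j : Int)) % 2
      · rw [if_pos hall, if_pos (fun j hj => (List.mem_cons.mp hj).elim (fun e => e ▸ h) (hall j))]
      · rw [if_neg hall, if_neg (fun hc => hall (fun j hj => hc j (List.mem_cons_of_mem i hj)))]
    · have : (((i:Int)) % 2 = 0 ∧ (seq.getD i 0) % 2 ≠ 0) ∨ (((i:Int)) % 2 = 1 ∧ (seq.getD i 0) % 2 ≠ 1) := by omega
      have hneg : ¬ ∀ j ∈ i :: is, (seq.getD j 0) % 2 = ((j : Int)) % 2 := fun hc => h (hc i (List.mem_cons_self))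
      rcases this with hb | hb
      · rw [if_pos hb, if_neg hneg]
      · rcases Decidable.em (((i:Int)) % 2 = 0 ∧ (seq.getD i 0) % 2 ≠ 0) with hb0 | hb0
        · rw [if_pos hb0, if_neg hneg]
        · rw [if_neg hb0, if_pos hb, if_neg hneg]

-- B's pair loop: returns 5 iff adjacent parities always differ.
theorem pvFlipB_eq (seq : List Int) :
    pvFlipB seq = if List.IsChain (fun a b => a % 2 ≠ b % 2) seq then 5 else 0 := by
  induction seq with
  | nil => simp [pvFlipB]
  | cons a tail ih =>
    cases tail with
    | nil => simp [pvFlipB]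
    | cons b rest =>
      simp only [pvFlipB, pvMod2]
      rw [ih]
      by_cases hR : a % 2 = b % 2
      · rw [if_pos hR, if_neg (by intro hch; exact absurd hR (List.isChain_cons_cons.mp hch).1)]
      · rw [if_neg hR]
        by_cases hc : List.IsChain (fun a b : Int => a % 2 ≠ b % 2) (b :: rest)
        · rw [if_pos hc, if_pos (List.isChain_cons_cons.mpr ⟨hR, hc⟩)]
        · rw [if_neg hc, if_neg (fun hch => hc (List.isChain_cons_cons.mp hch).2)]

-- index parity ↔ anchored alternation, for a nonempty list
theorem pvKey (s0 : Int) (tl : List Int) :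
    (∀ i ∈ List.range (s0 :: tl).length, ((s0 :: tl).getD i 0) % 2 = ((i : Int)) % 2)
      ↔ (s0 % 2 = 0 ∧ List.IsChain (fun a b => a % 2 ≠ b % 2) (s0 :: tl)) := by
  set seq := s0 :: tl with hseq
  constructor
  · intro h
    refine ⟨by simpa [hseq] using h 0 (by simp [hseq]), ?_⟩
    rw [List.isChain_iff_getElem]
    intro i hi
    have h1 := h i (List.mem_range.mpr (by omega))
    have h2 := h (i+1) (List.mem_range.mpr (by omega))
    rw [List.getD_eq_getElem _ _ (by omega)] at h1
    rw [List.getD_eq_getElem _ _ (by omega)] at h2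
    rw [h1, h2]
    push_cast
    omega
  · rintro ⟨h0, hc⟩
    rw [List.isChain_iff_getElem] at hc
    intro i hi
    simp only [List.mem_range] at hi
    induction i with
    | zero => simpa [hseq] using h0
    | succ j ihj =>
      have hj := ihj (by omega)
      have hcj := hc j (by omega)
      rw [List.getD_eq_getElem _ _ (by omega)] at hj ⊢
      rw [hj] at hcj
      have p0 : 0 ≤ seq[j+1] % 2 := Int.emod_nonneg _ (by norm_num)
      have p1 : seq[j+1] % 2 < 2 := Int.emod_lt_of_pos _ (by norm_num)
      push_cast
      omega

-- the two loops agree once the guard holds (n = len, nonempty)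
theorem pvLoops_agree (s0 : Int) (tl : List Int) :
    pvLoopA (s0 :: tl) (PySem.List.pyRange 0 ((s0 :: tl).length : Int) 1) =
      (if PySem.Int.mod s0 2 ≠ 0 then 0 else pvFlipB (s0 :: tl)) := by
  rw [PySem.List.pyRange_zero_nat, pvLoopA_eq, pvFlipB_eq, pvMod2]
  by_cases h : ∀ i ∈ List.range (s0 :: tl).length, ((s0 :: tl).getD i 0) % 2 = ((i : Int)) % 2
  · rw [if_pos h]
    rw [pvKey] at h
    rw [if_neg (by simpa using h.1), if_pos h.2]
  · rw [if_neg h]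
    rw [pvKey] at h
    push Not at h
    by_cases h0 : s0 % 2 = 0
    · rw [if_neg (by simpa using h0), if_neg (h h0)]
    · rw [if_pos (by simpa using h0)]

-- the two ports agree after the shared parsing prefix, for every n and sequence
theorem pvTail (n : Int) (sequence : List Int) :
    (if n ≠ (sequence.length : Int) ∨ n < 5 ∨ n > 9000 then (0:Int)
     else pvLoopA sequence (PySem.List.pyRange 0 n 1)) =
    (if n = (sequence.length : Int) ∧ 5 ≤ n ∧ n ≤ 9000 then
        (match sequence with
         | [] => (0:Int)
         | s0 :: _ => if PySem.Int.mod s0 2 ≠ 0 then 0 else pvFlipB sequence)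
     else 0) := by
  by_cases hguard : n = (sequence.length : Int) ∧ 5 ≤ n ∧ n ≤ 9000
  · rw [if_neg (by omega), if_pos hguard]
    obtain ⟨hn, h5, _⟩ := hguard
    cases sequence with
    | nil => simp at hn; omega
    | cons s0 tl =>
      rw [hn]
      exact pvLoops_agree s0 tl
  · rw [if_pos (by omega), if_neg hguard]

-- ===== VERDICT (by name: the statement is the Claim_ definition above) =====
theorem grade_phase4_spec : Claim_equal_grade_phase4 := by
  intro answer _ _
  unfold Spec_grade_phase4 grade_phase4 grade_phase4_alt
  generalize PySem.Str.split₀ (PySem.Str.strip answer) = xs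
  cases h1 : PySem.List.pyGet? xs 0 with
  | none => simp only [h1]
  | some first =>
    simp only [h1]
    cases PySem.Int.ofStr? first with
    | none => rfl
    | some n =>
      cases (PySem.List.slice xs (some 1) none).mapM PySem.Int.ofStr? with
      | none => rfl
      | some sequence => exact pvTail n sequence
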